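-- pv_equiv track=rewrite | github.com/corca-ai/charness | scripts/recent_lessons_lib.py | _bullet_items
-- ===== SOURCE A (Python) =====
-- def _bullet_items(section_text: str) -> list[str]:
--     items: list[str] = []
--     current: list[str] = []
--     for raw_line in section_text.splitlines():
--         if raw_line.startswith("- "):
--             if current:
--                 items.append(" ".join(part.strip() for part in current if part.strip()))
--             current = [raw_line[2:].strip()]
--             continue
--         if current and raw_line.strip():
--             current.append(raw_line.strip())
--     if current:
--         items.append(" ".join(part.strip() for part in current if part.strip()))
--     return [item for item in items if item]
-- ===== SOURCE B (Python) =====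
-- def _bullet_items(section_text: str) -> list[str]:
--     rev_items: list[str] = []
--     pending_rev: list[str] = []
--     for line in reversed(section_text.splitlines()):
--         if line.startswith("- "):
--             parts = [line[2:]] + pending_rev[::-1]
--             item = " ".join(p.strip() for p in parts if p.strip())
--             if item:
--                 rev_items.append(item)
--             pending_rev = []
--         else:
--             pending_rev.append(line)
--     return rev_items[::-1]
-- ===== Notes on version B (the rewrite author's own statement) =====
-- stated objective: alternative
-- what changed: B scans the lines in reverse so each bullet marker renders its item immediately from the raw lines pending below it, building the output back-to-front with no open-item accumulator and no duplicated end-of-loop flush.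
import Mathlib
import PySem

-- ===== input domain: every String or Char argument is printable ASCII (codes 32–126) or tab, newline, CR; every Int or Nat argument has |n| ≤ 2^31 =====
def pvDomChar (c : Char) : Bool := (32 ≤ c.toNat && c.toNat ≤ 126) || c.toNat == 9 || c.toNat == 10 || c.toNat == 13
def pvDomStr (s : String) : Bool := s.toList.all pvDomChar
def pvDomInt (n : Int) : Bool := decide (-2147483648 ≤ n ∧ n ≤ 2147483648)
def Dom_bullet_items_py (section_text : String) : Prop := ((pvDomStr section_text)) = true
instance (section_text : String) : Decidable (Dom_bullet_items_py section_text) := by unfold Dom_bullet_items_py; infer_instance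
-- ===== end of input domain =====

-- B scans the lines in reverse, rendering each bullet item at its marker from the raw
-- pending lines below it and building the output back-to-front; return values are equal.

-- ===== PORT A =====
-- " ".join(part.strip() for part in current if part.strip())
def pvRenderA (current : List String) : String :=
  PySem.Str.join " " (((current.map PySem.Str.strip).filter (fun p => p ≠ "")))

def pvStepA (st : List String × List String) (raw_line : String) : List String × List String :=
  if PySem.Str.startswith raw_line "- " then
    ((if st.2 ≠ [] then st.1 ++ [pvRenderA st.2] else st.1),
     [PySem.Str.strip (PySem.Str.slice raw_line (some 2) none)])
  else if st.2 ≠ [] ∧ PySem.Str.strip raw_line ≠ "" then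
    (st.1, st.2 ++ [PySem.Str.strip raw_line])
  else st

-- 'if current: items.append(...)' then 'return [item for item in items if item]'
def pvFinishA (st : List String × List String) : List String :=
  (if st.2 ≠ [] then st.1 ++ [pvRenderA st.2] else st.1).filter (fun item => item ≠ "")

def bullet_items_py (section_text : String) : List String :=
  pvFinishA ((PySem.Str.splitlines section_text).foldl pvStepA ([], []))

-- ===== PORT B =====
-- " ".join(p.strip() for p in parts if p.strip())
def pvRenderB (parts : List String) : String :=
  PySem.Str.join " " ((parts.filter (fun p => PySem.Str.strip p ≠ "")).map PySem.Str.strip)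

-- the loop body; state = (rev_items, pending_rev); xs[::-1] is List.reverse
-- (PySem.List.slice?_none_none_neg_one)
def pvStepB (st : List String × List String) (line : String) : List String × List String :=
  if PySem.Str.startswith line "- " then
    let item := pvRenderB (PySem.Str.slice line (some 2) none :: st.2.reverse)
    ((if item ≠ "" then st.1 ++ [item] else st.1), [])
  else (st.1, st.2 ++ [line])

def bullet_items_py_alt (section_text : String) : List String :=
  ((((PySem.Str.splitlines section_text).reverse).foldl pvStepB ([], [])).1).reverse

-- ===== PRECONDITION & SPEC =====
def Spec_bullet_items_py (section_text : String) (out : List String) : Prop := out = bullet_items_py_alt section_text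
instance (section_text : String) (out : List String) : Decidable (Spec_bullet_items_py section_text out) := by unfold Spec_bullet_items_py; infer_instance

-- ===== CLAIM =====
def Claim_equal_bullet_items_py : Prop := ∀ (section_text : String), Dom_bullet_items_py section_text → Spec_bullet_items_py section_text (bullet_items_py section_text)

-- ===== LEMMAS AND PROOFS =====

-- nm l : l is not a bullet marker line
def pvNm (l : String) : Bool := !(PySem.Str.startswith l "- ")

-- reference: recursive segment parser, one segment per marker line
def pvR : List String → List String
  | [] => []
  | l :: ls =>
    if PySem.Str.startswith l "- " then
      (let item := pvRenderB (PySem.Str.slice l (some 2) none :: ls.takeWhile pvNm)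
       if item ≠ "" then [item] else []) ++ pvR (ls.dropWhile pvNm)
    else pvR ls
termination_by ls => ls.length
decreasing_by
  · have := List.length_dropWhile_le pvNm ls; simp; omega
  · simp

theorem pvR_dropWhile (ls : List String) : pvR (ls.dropWhile pvNm) = pvR ls := by
  induction ls with
  | nil => rfl
  | cons l t ih =>
    cases h : PySem.Str.startswith l "- " with
    | true =>
      rw [List.dropWhile_cons_of_neg (by simp only [pvNm, h, Bool.not_true]; simp)]
    | false =>
      rw [List.dropWhile_cons_of_pos (by simp only [pvNm, h, Bool.not_false]), ih]
      conv_rhs => rw [pvR]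
      rw [if_neg (by simp only [h]; simp)]

-- strip is idempotent
theorem pv_dropWhile_prefix {p : Char → Bool} {t u : List Char} (ht : List.dropWhile p t = t)
    (h : u <+: t) : List.dropWhile p u = u := by
  cases u with
  | nil => rfl
  | cons a u' =>
    obtain ⟨r, hr⟩ := h
    have hpa : p a = false := by
      by_contra hpa
      have hpa : p a = true := by simpa using hpa
      rw [← hr, List.cons_append] at ht
      simp only [List.dropWhile_cons, hpa, if_true] at ht
      have hlen := congrArg List.length ht
      have hle := List.length_dropWhile_le p (u' ++ r)
      simp at hlen hle
      omega
    simp [hpa]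

theorem pv_chars_strip_strip (cs : List Char) :
    PySem.Chars.strip (PySem.Chars.strip cs) = PySem.Chars.strip cs := by
  unfold PySem.Chars.strip PySem.Chars.rstrip PySem.Chars.lstrip
  set p := PySem.Chars.isspace with hp
  set t := List.dropWhile p cs with ht
  have htt : List.dropWhile p t = t := by rw [ht]; exact List.dropWhile_idempotent p cs
  set r := (List.dropWhile p t.reverse).reverse with hr
  have hrt : r <+: t := by
    rw [hr]
    have := List.reverse_prefix.mpr (List.dropWhile_suffix (l := t.reverse) p)
    simpa using this
  have h1 : List.dropWhile p r = r := pv_dropWhile_prefix htt hrt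
  have h2 : r.reverse = List.dropWhile p t.reverse := by rw [hr, List.reverse_reverse]
  rw [h1, h2, List.dropWhile_idempotent, ← h2, List.reverse_reverse]

theorem pv_strip_strip (s : String) : PySem.Str.strip (PySem.Str.strip s) = PySem.Str.strip s := by
  simp [PySem.Str.strip, String.toList_ofList, pv_chars_strip_strip]

-- A's render of a stripped group equals B's render of the raw segment
theorem pvRender_conv (h : String) (body : List String) :
    pvRenderA (PySem.Str.strip h ::
      (body.map PySem.Str.strip).filter (fun p => p ≠ "")) = pvRenderB (h :: body) := by
  unfold pvRenderA pvRenderB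
  apply congrArg
  have hS : ((body.map PySem.Str.strip).filter (fun p => p ≠ "")).map PySem.Str.strip
      = (body.map PySem.Str.strip).filter (fun p => p ≠ "") := by
    have := List.map_congr_left (l := (body.map PySem.Str.strip).filter (fun p => p ≠ ""))
      (f := PySem.Str.strip) (g := id) ?_
    · simpa using this
    · intro x hx
      obtain ⟨y, hy, rfl⟩ := List.mem_map.mp (List.mem_of_mem_filter hx)
      exact pv_strip_strip y
  rw [List.map_cons, hS, pv_strip_strip]
  rw [List.filter_cons, List.filter_cons]
  have hT : (body.filter (fun p => PySem.Str.strip p ≠ "")).map PySem.Str.strip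
      = (body.map PySem.Str.strip).filter (fun p => p ≠ "") := by
    rw [List.filter_map]
    rfl
  rw [List.filter_filter]
  by_cases hh : PySem.Str.strip h = ""
  · simp only [hh, ne_eq, not_true_eq_false, decide_false, Bool.and_self]
    rw [← hT]
    simp
  · simp only [ne_eq, hh, not_false_eq_true, decide_true, if_true, Bool.and_self, List.map_cons]
    rw [← hT]

-- B's foldr state characterization
theorem pvB_fold (lines : List String) :
    (lines.foldr (fun l st => pvStepB st l) (([], []) : List String × List String)).1.reverse
      = pvR lines ∧
    (lines.foldr (fun l st => pvStepB st l) (([], []) : List String × List String)).2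
      = (lines.takeWhile pvNm).reverse := by
  induction lines with
  | nil => exact ⟨by rw [pvR]; rfl, rfl⟩
  | cons l t ih =>
    obtain ⟨ih1, ih2⟩ := ih
    rw [List.foldr_cons]
    set st' := t.foldr (fun l st => pvStepB st l) (([], []) : List String × List String) with hst
    have h2 : st'.2.reverse = t.takeWhile pvNm := by rw [ih2, List.reverse_reverse]
    cases h : PySem.Str.startswith l "- " with
    | true =>
      simp only [pvStepB, h, if_true, h2]
      constructor
      · rw [pvR, if_pos h, pvR_dropWhile, ← ih1]
        by_cases hi : pvRenderB (PySem.Str.slice l (some 2) none :: t.takeWhile pvNm) = ""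
        · simp [hi]
        · simp [hi]
      · rw [List.takeWhile_cons_of_neg (show ¬(pvNm l = true) by simp only [pvNm]; rw [h]; simp)]; rfl
    | false =>
      simp only [pvStepB, h, Bool.false_eq_true, if_false]
      constructor
      · rw [ih1]
        conv_rhs => rw [pvR]
        rw [if_neg (show ¬(PySem.Str.startswith l "- " = true) by rw [h]; simp)]
      · rw [List.takeWhile_cons_of_pos (show pvNm l = true by simp only [pvNm]; rw [h]; rfl), List.reverse_cons, ih2]

-- A's run from a live group
theorem pvA_run (rest : List String) (items c : List String) (hc : c ≠ []) :
    ((if (rest.foldl pvStepA (items, c)).2 ≠ []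
        then (rest.foldl pvStepA (items, c)).1 ++ [pvRenderA (rest.foldl pvStepA (items, c)).2]
        else (rest.foldl pvStepA (items, c)).1).filter (fun i => i ≠ "")) =
      items.filter (fun i => i ≠ "") ++
      ([pvRenderA (c ++ ((rest.takeWhile pvNm).map PySem.Str.strip).filter (fun p => p ≠ ""))].filter (fun i => i ≠ "")) ++
      pvR (rest.dropWhile pvNm) := by
  induction rest generalizing items c with
  | nil =>
    rw [List.foldl_nil, if_pos hc]
    simp [List.filter_append, pvR]
  | cons l rest' ih =>
    rw [List.foldl_cons]
    cases h : PySem.Str.startswith l "- " with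
    | true =>
      have hstep : pvStepA (items, c) l
          = (items ++ [pvRenderA c], [PySem.Str.strip (PySem.Str.slice l (some 2) none)]) := by
        simp only [pvStepA, h, if_true]
        rw [if_pos hc]
      rw [hstep, ih _ _ (by simp)]
      rw [List.takeWhile_cons_of_neg (show ¬(pvNm l = true) by simp only [pvNm]; rw [h]; simp)]
      rw [List.dropWhile_cons_of_neg (show ¬(pvNm l = true) by simp only [pvNm]; rw [h]; simp)]
      conv_rhs => rw [pvR]
      rw [if_pos h]
      rw [List.filter_append, List.singleton_append, pvRender_conv]
      by_cases h1 : pvRenderA c = "" <;>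
        by_cases h2 : pvRenderB (PySem.Str.slice l (some 2) none :: rest'.takeWhile pvNm) = "" <;>
        simp [h1, h2, List.append_assoc]
    | false =>
      have hnm : pvNm l = true := by simp only [pvNm]; rw [h]; rfl
      rw [List.takeWhile_cons_of_pos hnm, List.dropWhile_cons_of_pos hnm]
      by_cases hs : PySem.Str.strip l = ""
      · have hstep : pvStepA (items, c) l = (items, c) := by
          simp only [pvStepA, h, Bool.false_eq_true, if_false]
          rw [if_neg (by simp [hs])]
        rw [hstep, ih _ _ hc]
        simp [hs]
      · have hstep : pvStepA (items, c) l = (items, c ++ [PySem.Str.strip l]) := by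
          simp only [pvStepA, h, Bool.false_eq_true, if_false]
          rw [if_pos ⟨hc, hs⟩]
        rw [hstep, ih _ _ (by simp)]
        simp [hs, List.append_assoc]

theorem pvA_pre (pre : List String) (hp : ∀ l ∈ pre, pvNm l = true) :
    pre.foldl pvStepA (([], []) : List String × List String) = ([], []) := by
  induction pre with
  | nil => rfl
  | cons l t ih =>
    have hl : PySem.Str.startswith l "- " = false := by
      have := hp l (by simp); simpa [pvNm] using this
    simp only [List.foldl_cons, pvStepA, hl]
    simpa using ih (fun x hx => hp x (by simp [hx]))

-- ===== VERDICT =====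
-- head of dropWhile fails the predicate
theorem pv_dropWhile_head {α : Type} (l l' : List α) (p : α → Bool) (a : α)
    (h : l.dropWhile p = a :: l') : p a = false := by
  have h1 := List.head_dropWhile_not p (l := l) (by rw [h]; simp)
  have h2 : (l.dropWhile p).head (by rw [h]; simp) = a := by simp [h]
  rwa [h2] at h1

-- ===== VERDICT =====
theorem bullet_items_py_spec : Claim_equal_bullet_items_py := by
  intro s _
  unfold Spec_bullet_items_py bullet_items_py bullet_items_py_alt
  have hB : (((PySem.Str.splitlines s).reverse.foldl pvStepB
      (([], []) : List String × List String)).1).reverse = pvR (PySem.Str.splitlines s) := by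
    rw [List.foldl_reverse]
    exact (pvB_fold (PySem.Str.splitlines s)).1
  rw [hB, ← pvR_dropWhile (PySem.Str.splitlines s)]
  have hsplit : (PySem.Str.splitlines s).foldl pvStepA (([], []) : List String × List String)
      = ((PySem.Str.splitlines s).dropWhile pvNm).foldl pvStepA ([], []) := by
    conv_lhs => rw [← List.takeWhile_append_dropWhile (p := pvNm) (l := PySem.Str.splitlines s)]
    rw [List.foldl_append, pvA_pre _ (fun l h => List.mem_takeWhile_imp h)]
  rw [hsplit]
  cases hd : (PySem.Str.splitlines s).dropWhile pvNm with
  | nil =>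
    rw [List.foldl_nil, pvFinishA, if_neg (by simp), pvR]
    rfl
  | cons m rest =>
    have hm : PySem.Str.startswith m "- " = true := by
      have := pv_dropWhile_head _ _ _ _ hd
      simpa [pvNm] using this
    rw [List.foldl_cons]
    have hstep0 : pvStepA ([], []) m
        = ([], [PySem.Str.strip (PySem.Str.slice m (some 2) none)]) := by
      simp only [pvStepA, hm, if_true]
      rw [if_neg (by simp)]
    rw [hstep0, pvFinishA, pvA_run _ _ _ (by simp), pvR, if_pos hm, List.singleton_append, pvRender_conv]
    by_cases h2 : pvRenderB (PySem.Str.slice m (some 2) none :: rest.takeWhile pvNm) = "" <;>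
      simp [h2]
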